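-- pv_equiv track=rewrite | github.com/BdM-15/proj-theseus | tools/extract_examples.py | categorize_examples
-- ===== SOURCE A (Python) =====
-- from typing import List, Dict
--
-- def categorize_examples(examples: List[Dict]) -> Dict[str, List[Dict]]:
--     """Group examples by primary entity type."""
--     categorized = {
--         'qasp_performance_metrics': [],
--         'section_l_m_mapping': [],
--         'requirements_workload': [],
--         'clauses': [],
--         'deliverables': [],
--         'strategic_themes': [],
--         'mixed': []
--     }
--
--     for example in examples:
--         title_lower = example['title'].lower()
--
--         if any(k in title_lower for k in ['qasp', 'performance', 'metric', 'po-']):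
--             categorized['qasp_performance_metrics'].append(example)
--         elif any(k in title_lower for k in ['section l', 'section m', 'evaluation', 'submission']):
--             categorized['section_l_m_mapping'].append(example)
--         elif any(k in title_lower for k in ['requirement', 'pws', 'sow', 'workload']):
--             categorized['requirements_workload'].append(example)
--         elif 'clause' in title_lower or 'far' in title_lower or 'dfars' in title_lower:
--             categorized['clauses'].append(example)
--         elif 'deliverable' in title_lower or 'cdrl' in title_lower:
--             categorized['deliverables'].append(example)
--         elif 'strategic' in title_lower or 'theme' in title_lower or 'hot button' in title_lower:
--             categorized['strategic_themes'].append(example)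
--         else:
--             categorized['mixed'].append(example)
--
--     return categorized
-- ===== SOURCE B (Python) =====
-- CATEGORIES = [
--     ('qasp_performance_metrics', ['qasp', 'performance', 'metric', 'po-']),
--     ('section_l_m_mapping', ['section l', 'section m', 'evaluation', 'submission']),
--     ('requirements_workload', ['requirement', 'pws', 'sow', 'workload']),
--     ('clauses', ['clause', 'far', 'dfars']),
--     ('deliverables', ['deliverable', 'cdrl']),
--     ('strategic_themes', ['strategic', 'theme', 'hot button']),
-- ]
--
--
-- def _label(example):
--     title_lower = example['title'].lower()
--     for name, keywords in CATEGORIES: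
--         if any(k in title_lower for k in keywords):
--             return name
--     return 'mixed'
--
--
-- def categorize_examples(examples):
--     names = [name for name, _ in CATEGORIES] + ['mixed']
--     return {n: [e for e in examples if _label(e) == n] for n in names}
-- ===== Notes on version B (the rewrite author's own statement) =====
-- stated objective: idiomatic
-- what changed: B replaces the if/elif cascade that appends into a mutable dict with a data-driven keyword table: a _label helper finds each example's first matching category, and the result is built as a dict comprehension of per-category filters.
import Mathlib
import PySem

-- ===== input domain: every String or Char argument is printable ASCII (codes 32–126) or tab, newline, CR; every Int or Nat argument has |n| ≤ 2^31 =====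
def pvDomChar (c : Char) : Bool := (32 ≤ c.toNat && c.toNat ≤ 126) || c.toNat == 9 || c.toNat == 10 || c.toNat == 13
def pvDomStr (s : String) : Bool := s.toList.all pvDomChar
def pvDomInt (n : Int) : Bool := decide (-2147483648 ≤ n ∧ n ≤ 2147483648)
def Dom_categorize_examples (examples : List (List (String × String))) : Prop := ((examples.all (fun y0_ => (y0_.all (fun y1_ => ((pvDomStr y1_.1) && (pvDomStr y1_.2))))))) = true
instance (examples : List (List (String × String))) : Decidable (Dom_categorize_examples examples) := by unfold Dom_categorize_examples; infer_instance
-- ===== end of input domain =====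

-- B changes only the decomposition (keyword table + per-category filters instead of an if/elif
-- cascade appending into a dict); the proof shows the return values agree whenever A returns.

-- ===== PORT A =====
-- step of A's for-loop: the if/elif cascade appending into the dict
def caStep (d : PySem.Dict String (List (List (String × String)))) (ex : List (String × String)) :
    PySem.Dict String (List (List (String × String))) :=
  -- ex['title'] : first-match lookup; Pre_ guarantees the key exists (else Python raises KeyError)
  let title_lower := PySem.Str.lower ((List.lookup "title" ex).getD "")
  if ["qasp", "performance", "metric", "po-"].any (fun k => PySem.Str.isIn k title_lower) then
    d.modify "qasp_performance_metrics" [] (· ++ [ex])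
  else if ["section l", "section m", "evaluation", "submission"].any (fun k => PySem.Str.isIn k title_lower) then
    d.modify "section_l_m_mapping" [] (· ++ [ex])
  else if ["requirement", "pws", "sow", "workload"].any (fun k => PySem.Str.isIn k title_lower) then
    d.modify "requirements_workload" [] (· ++ [ex])
  else if PySem.Str.isIn "clause" title_lower || PySem.Str.isIn "far" title_lower || PySem.Str.isIn "dfars" title_lower then
    d.modify "clauses" [] (· ++ [ex])
  else if PySem.Str.isIn "deliverable" title_lower || PySem.Str.isIn "cdrl" title_lower then
    d.modify "deliverables" [] (· ++ [ex])
  else if PySem.Str.isIn "strategic" title_lower || PySem.Str.isIn "theme" title_lower || PySem.Str.isIn "hot button" title_lower then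
    d.modify "strategic_themes" [] (· ++ [ex])
  else
    d.modify "mixed" [] (· ++ [ex])

def categorize_examples (examples : List (List (String × String))) : List (String × List (List (String × String))) :=
  let categorized : PySem.Dict String (List (List (String × String))) :=
    ((((((PySem.Dict.empty.insert "qasp_performance_metrics" []).insert "section_l_m_mapping" []).insert
        "requirements_workload" []).insert "clauses" []).insert "deliverables" []).insert
        "strategic_themes" []).insert "mixed" []
  (examples.foldl caStep categorized).items

-- ===== PORT B =====
def pvCategories : List (String × List String) :=
  [("qasp_performance_metrics", ["qasp", "performance", "metric", "po-"]),
   ("section_l_m_mapping", ["section l", "section m", "evaluation", "submission"]),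
   ("requirements_workload", ["requirement", "pws", "sow", "workload"]),
   ("clauses", ["clause", "far", "dfars"]),
   ("deliverables", ["deliverable", "cdrl"]),
   ("strategic_themes", ["strategic", "theme", "hot button"])]

def pvLabel (ex : List (String × String)) : String :=
  let title_lower := PySem.Str.lower ((List.lookup "title" ex).getD "")
  match pvCategories.find? (fun p => p.2.any (fun k => PySem.Str.isIn k title_lower)) with
  | some p => p.1
  | none => "mixed"

def categorize_examples_alt (examples : List (List (String × String))) : List (String × List (List (String × String))) :=
  (pvCategories.map Prod.fst ++ ["mixed"]).map
    (fun n => (n, examples.filter (fun e => pvLabel e == n)))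

-- ===== PRECONDITION & SPEC =====
-- Pre_ excludes exactly the examples without a 'title' key, on which Python's ex['title'] raises KeyError.
def Pre_categorize_examples (examples : List (List (String × String))) : Prop :=
  ∀ e ∈ examples, (List.lookup "title" e).isSome = true
instance (examples : List (List (String × String))) : Decidable (Pre_categorize_examples examples) := by
  unfold Pre_categorize_examples; infer_instance

def pvWitness_categorize_examples : (List (List (String × String))) :=
  [[("title", "QASP metrics")], [("title", "misc note")]]

def Spec_categorize_examples (examples : List (List (String × String))) (out : List (String × List (List (String × String)))) : Prop := out = categorize_examples_alt examples
instance (examples : List (List (String × String))) (out : List (String × List (List (String × String)))) : Decidable (Spec_categorize_examples examples out) := by unfold Spec_categorize_examples; infer_instance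

-- ===== CLAIM (what is proved, stated in full; the proofs are below) =====
def Claim_equal_categorize_examples : Prop := ∀ (examples : List (List (String × String))), Dom_categorize_examples examples → Pre_categorize_examples examples → Spec_categorize_examples examples (categorize_examples examples)

-- ===== LEMMAS AND PROOFS =====

-- the invariant: folding A's loop over a dict holding the seven lists appends each
-- ex to the list of its pvLabel category
lemma caFold_items (examples : List (List (String × String)))
    (l1 l2 l3 l4 l5 l6 l7 : List (List (String × String))) :
    (examples.foldl caStep (PySem.Dict.mk
      [("qasp_performance_metrics", l1), ("section_l_m_mapping", l2),
       ("requirements_workload", l3), ("clauses", l4), ("deliverables", l5),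
       ("strategic_themes", l6), ("mixed", l7)])).items =
    [("qasp_performance_metrics", l1 ++ examples.filter (fun e => pvLabel e == "qasp_performance_metrics")),
     ("section_l_m_mapping", l2 ++ examples.filter (fun e => pvLabel e == "section_l_m_mapping")),
     ("requirements_workload", l3 ++ examples.filter (fun e => pvLabel e == "requirements_workload")),
     ("clauses", l4 ++ examples.filter (fun e => pvLabel e == "clauses")),
     ("deliverables", l5 ++ examples.filter (fun e => pvLabel e == "deliverables")),
     ("strategic_themes", l6 ++ examples.filter (fun e => pvLabel e == "strategic_themes")),
     ("mixed", l7 ++ examples.filter (fun e => pvLabel e == "mixed"))] := by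
  induction examples generalizing l1 l2 l3 l4 l5 l6 l7 with
  | nil => simp
  | cons e rest ih =>
    simp only [List.foldl_cons]
    by_cases h1 : (["qasp", "performance", "metric", "po-"].any (fun k => PySem.Str.isIn k (PySem.Str.lower ((List.lookup "title" e).getD "")))) = true
    · -- category 1 matches
      have hstep : caStep (PySem.Dict.mk [("qasp_performance_metrics", l1), ("section_l_m_mapping", l2), ("requirements_workload", l3), ("clauses", l4), ("deliverables", l5), ("strategic_themes", l6), ("mixed", l7)]) e
          = PySem.Dict.mk [("qasp_performance_metrics", l1 ++ [e]), ("section_l_m_mapping", l2), ("requirements_workload", l3), ("clauses", l4), ("deliverables", l5), ("strategic_themes", l6), ("mixed", l7)] := by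
        simp only [caStep, h1]
        simp [PySem.Dict.modify, PySem.Dict.getD, PySem.Dict.get?, PySem.Dict.insert]
      rw [hstep, ih]
      have hl : pvLabel e = "qasp_performance_metrics" := by
        simp only [List.any_cons, List.any_nil, Bool.or_false] at h1
        simp only [pvLabel, pvCategories, List.find?, List.any_cons, List.any_nil, Bool.or_false]
        rw [h1]
      simp [List.filter_cons, hl]
    · rw [Bool.not_eq_true] at h1
      by_cases h2 : (["section l", "section m", "evaluation", "submission"].any (fun k => PySem.Str.isIn k (PySem.Str.lower ((List.lookup "title" e).getD "")))) = true
      · -- category 2 matches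
        have hstep : caStep (PySem.Dict.mk [("qasp_performance_metrics", l1), ("section_l_m_mapping", l2), ("requirements_workload", l3), ("clauses", l4), ("deliverables", l5), ("strategic_themes", l6), ("mixed", l7)]) e
            = PySem.Dict.mk [("qasp_performance_metrics", l1), ("section_l_m_mapping", l2 ++ [e]), ("requirements_workload", l3), ("clauses", l4), ("deliverables", l5), ("strategic_themes", l6), ("mixed", l7)] := by
          simp only [caStep, h1, h2]
          simp [PySem.Dict.modify, PySem.Dict.getD, PySem.Dict.get?, PySem.Dict.insert]
        rw [hstep, ih]
        have hl : pvLabel e = "section_l_m_mapping" := by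
          simp only [List.any_cons, List.any_nil, Bool.or_false] at h1 h2
          simp only [pvLabel, pvCategories, List.find?, List.any_cons, List.any_nil, Bool.or_false]
          rw [h1, h2]
        simp [List.filter_cons, hl]
      · rw [Bool.not_eq_true] at h2
        by_cases h3 : (["requirement", "pws", "sow", "workload"].any (fun k => PySem.Str.isIn k (PySem.Str.lower ((List.lookup "title" e).getD "")))) = true
        · -- category 3 matches
          have hstep : caStep (PySem.Dict.mk [("qasp_performance_metrics", l1), ("section_l_m_mapping", l2), ("requirements_workload", l3), ("clauses", l4), ("deliverables", l5), ("strategic_themes", l6), ("mixed", l7)]) e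
              = PySem.Dict.mk [("qasp_performance_metrics", l1), ("section_l_m_mapping", l2), ("requirements_workload", l3 ++ [e]), ("clauses", l4), ("deliverables", l5), ("strategic_themes", l6), ("mixed", l7)] := by
            simp only [caStep, h1, h2, h3]
            simp [PySem.Dict.modify, PySem.Dict.getD, PySem.Dict.get?, PySem.Dict.insert]
          rw [hstep, ih]
          have hl : pvLabel e = "requirements_workload" := by
            simp only [List.any_cons, List.any_nil, Bool.or_false] at h1 h2 h3
            simp only [pvLabel, pvCategories, List.find?, List.any_cons, List.any_nil, Bool.or_false]
            rw [h1, h2, h3]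
          simp [List.filter_cons, hl]
        · rw [Bool.not_eq_true] at h3
          by_cases h4 : (PySem.Str.isIn "clause" (PySem.Str.lower ((List.lookup "title" e).getD "")) || PySem.Str.isIn "far" (PySem.Str.lower ((List.lookup "title" e).getD "")) || PySem.Str.isIn "dfars" (PySem.Str.lower ((List.lookup "title" e).getD ""))) = true
          · -- category 4 matches
            have hstep : caStep (PySem.Dict.mk [("qasp_performance_metrics", l1), ("section_l_m_mapping", l2), ("requirements_workload", l3), ("clauses", l4), ("deliverables", l5), ("strategic_themes", l6), ("mixed", l7)]) e
                = PySem.Dict.mk [("qasp_performance_metrics", l1), ("section_l_m_mapping", l2), ("requirements_workload", l3), ("clauses", l4 ++ [e]), ("deliverables", l5), ("strategic_themes", l6), ("mixed", l7)] := by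
              simp only [caStep, h1, h2, h3, h4]
              simp [PySem.Dict.modify, PySem.Dict.getD, PySem.Dict.get?, PySem.Dict.insert]
            rw [hstep, ih]
            have hl : pvLabel e = "clauses" := by
              simp only [List.any_cons, List.any_nil, Bool.or_false] at h1 h2 h3
              simp only [pvLabel, pvCategories, List.find?, List.any_cons, List.any_nil, Bool.or_false]
              simp only [Bool.or_assoc] at h4
              rw [h1, h2, h3, h4]
            simp [List.filter_cons, hl]
          · rw [Bool.not_eq_true] at h4
            by_cases h5 : (PySem.Str.isIn "deliverable" (PySem.Str.lower ((List.lookup "title" e).getD "")) || PySem.Str.isIn "cdrl" (PySem.Str.lower ((List.lookup "title" e).getD ""))) = true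
            · -- category 5 matches
              have hstep : caStep (PySem.Dict.mk [("qasp_performance_metrics", l1), ("section_l_m_mapping", l2), ("requirements_workload", l3), ("clauses", l4), ("deliverables", l5), ("strategic_themes", l6), ("mixed", l7)]) e
                  = PySem.Dict.mk [("qasp_performance_metrics", l1), ("section_l_m_mapping", l2), ("requirements_workload", l3), ("clauses", l4), ("deliverables", l5 ++ [e]), ("strategic_themes", l6), ("mixed", l7)] := by
                simp only [caStep, h1, h2, h3, h4, h5]
                simp [PySem.Dict.modify, PySem.Dict.getD, PySem.Dict.get?, PySem.Dict.insert]
              rw [hstep, ih]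
              have hl : pvLabel e = "deliverables" := by
                simp only [List.any_cons, List.any_nil, Bool.or_false] at h1 h2 h3
                simp only [pvLabel, pvCategories, List.find?, List.any_cons, List.any_nil, Bool.or_false]
                simp only [Bool.or_assoc] at h4
                rw [h1, h2, h3, h4, h5]
              simp [List.filter_cons, hl]
            · rw [Bool.not_eq_true] at h5
              by_cases h6 : (PySem.Str.isIn "strategic" (PySem.Str.lower ((List.lookup "title" e).getD "")) || PySem.Str.isIn "theme" (PySem.Str.lower ((List.lookup "title" e).getD "")) || PySem.Str.isIn "hot button" (PySem.Str.lower ((List.lookup "title" e).getD ""))) = true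
              · -- category 6 matches
                have hstep : caStep (PySem.Dict.mk [("qasp_performance_metrics", l1), ("section_l_m_mapping", l2), ("requirements_workload", l3), ("clauses", l4), ("deliverables", l5), ("strategic_themes", l6), ("mixed", l7)]) e
                    = PySem.Dict.mk [("qasp_performance_metrics", l1), ("section_l_m_mapping", l2), ("requirements_workload", l3), ("clauses", l4), ("deliverables", l5), ("strategic_themes", l6 ++ [e]), ("mixed", l7)] := by
                  simp only [caStep, h1, h2, h3, h4, h5, h6]
                  simp [PySem.Dict.modify, PySem.Dict.getD, PySem.Dict.get?, PySem.Dict.insert]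
                rw [hstep, ih]
                have hl : pvLabel e = "strategic_themes" := by
                  simp only [List.any_cons, List.any_nil, Bool.or_false] at h1 h2 h3
                  simp only [pvLabel, pvCategories, List.find?, List.any_cons, List.any_nil, Bool.or_false]
                  simp only [Bool.or_assoc] at h4 h6
                  rw [h1, h2, h3, h4, h5, h6]
                simp [List.filter_cons, hl]
              · rw [Bool.not_eq_true] at h6
                have hstep : caStep (PySem.Dict.mk [("qasp_performance_metrics", l1), ("section_l_m_mapping", l2), ("requirements_workload", l3), ("clauses", l4), ("deliverables", l5), ("strategic_themes", l6), ("mixed", l7)]) e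
                    = PySem.Dict.mk [("qasp_performance_metrics", l1), ("section_l_m_mapping", l2), ("requirements_workload", l3), ("clauses", l4), ("deliverables", l5), ("strategic_themes", l6), ("mixed", l7 ++ [e])] := by
                  simp only [caStep, h1, h2, h3, h4, h5, h6]
                  simp [PySem.Dict.modify, PySem.Dict.getD, PySem.Dict.get?, PySem.Dict.insert]
                rw [hstep, ih]
                have hl : pvLabel e = "mixed" := by
                  simp only [List.any_cons, List.any_nil, Bool.or_false] at h1 h2 h3
                  simp only [pvLabel, pvCategories, List.find?, List.any_cons, List.any_nil, Bool.or_false]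
                  simp only [Bool.or_assoc] at h4 h6
                  rw [h1, h2, h3, h4, h5, h6]
                simp [List.filter_cons, hl]

-- ===== VERDICT (by name: the statement is the Claim_ definition above) =====
theorem categorize_examples_spec : Claim_equal_categorize_examples := by
  intro examples _ _
  unfold Spec_categorize_examples categorize_examples categorize_examples_alt
  have hinit : ((((((PySem.Dict.empty.insert "qasp_performance_metrics"
      ([] : List (List (String × String)))).insert "section_l_m_mapping" []).insert
      "requirements_workload" []).insert "clauses" []).insert "deliverables" []).insert
      "strategic_themes" []).insert "mixed" [] = PySem.Dict.mk
      [("qasp_performance_metrics", []), ("section_l_m_mapping", []),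
       ("requirements_workload", []), ("clauses", []), ("deliverables", []),
       ("strategic_themes", []), ("mixed", [])] := by decide
  rw [hinit, caFold_items]
  simp [pvCategories]
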